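-- pv_equiv track=rewrite | github.com/HarryLiu2003/Navi_CFCI | backend/Keyword_Extraction/keyword_extraction.py | get_context_batch
-- ===== SOURCE A (Python) =====
-- def get_context_batch(text: str, phrases: list, window_size: int = 3) -> dict:
--     """Get context for multiple phrases in a single text scan"""
--     lines = text.splitlines()
--     contexts = {phrase: [] for phrase in phrases}
--
--     for i, line in enumerate(lines):
--         for phrase in phrases:
--             if phrase in line:
--                 start_idx = max(0, i - window_size)
--                 end_idx = min(len(lines), i + window_size + 1)
--                 contexts[phrase].append("\n".join(lines[start_idx:end_idx]))
--
--     return contexts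
-- ===== SOURCE B (Python) =====
-- def get_context_batch(text: str, phrases: list, window_size: int = 3) -> dict:
--     """Get context for multiple phrases: precompute every line's window once,
--     then collect per phrase from a single zip of lines with their windows."""
--     lines = text.splitlines()
--     windows = ["\n".join(lines[max(0, i - window_size):i + window_size + 1])
--                for i in range(len(lines))]
--     return {p: [w for line, w in zip(lines, windows) if p in line]
--             for p in phrases}
-- ===== Notes on version B (the rewrite author's own statement) =====
-- stated objective: alternative
-- what changed: B precomputes each line's context window exactly once and builds the result with a per-phrase comprehension over a zip of lines with their windows, instead of A's line-major nested loop that re-slices and re-joins the window at every match.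
-- outside the precondition, e.g. on get_context_batch('a', ['a', 'a'], 0): A returns {'a': ['a', 'a']}, B returns {'a': ['a']}
import Mathlib
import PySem

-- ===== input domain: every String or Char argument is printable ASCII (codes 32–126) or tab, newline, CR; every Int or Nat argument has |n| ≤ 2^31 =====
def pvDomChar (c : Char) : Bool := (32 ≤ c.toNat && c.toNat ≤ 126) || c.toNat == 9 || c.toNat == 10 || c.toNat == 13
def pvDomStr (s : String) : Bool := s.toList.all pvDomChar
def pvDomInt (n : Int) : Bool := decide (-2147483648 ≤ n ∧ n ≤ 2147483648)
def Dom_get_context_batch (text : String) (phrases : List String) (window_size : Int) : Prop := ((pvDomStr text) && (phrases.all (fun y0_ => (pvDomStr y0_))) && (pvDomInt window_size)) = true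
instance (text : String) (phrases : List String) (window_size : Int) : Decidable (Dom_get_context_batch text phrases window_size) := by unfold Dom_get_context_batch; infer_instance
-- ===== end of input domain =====

-- B precomputes each line's context window once and collects matches per phrase
-- from one zip of lines with windows, instead of A's line-major nested loop that
-- re-slices and re-joins the window at every match (objective: alternative).


-- ===== PORT A =====
def get_context_batch (text : String) (phrases : List String) (window_size : Int) : List (String × List String) :=
  let lines := PySem.Str.splitlines text
  let contexts : PySem.Dict String (List String) :=
    phrases.foldl (fun d phrase => d.insert phrase []) PySem.Dict.empty
  let contexts :=
    (PySem.List.enumerate lines).foldl (fun d il =>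
      phrases.foldl (fun d phrase =>
        if PySem.Str.isIn phrase il.2 then
          d.modify phrase [] (· ++ [PySem.Str.join "\n"
            (PySem.List.slice lines (some (max 0 (il.1 - window_size)))
              (some (min (PySem.List.len lines) (il.1 + window_size + 1))))])
        else d) d) contexts
  contexts.items

-- ===== PORT B =====
def get_context_batch_alt (text : String) (phrases : List String) (window_size : Int) : List (String × List String) :=
  let lines := PySem.Str.splitlines text
  let windows := (PySem.List.pyRange 0 (PySem.List.len lines)).map (fun i =>
    PySem.Str.join "\n"
      (PySem.List.slice lines (some (max 0 (i - window_size))) (some (i + window_size + 1))))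
  (phrases.foldl (fun d p =>
      d.insert p (((lines.zip windows).filter (fun lw => PySem.Str.isIn p lw.1)).map (·.2)))
    PySem.Dict.empty).items


-- ===== PRECONDITION & SPEC =====
-- Pre_ excludes exactly the inputs on which a phrase that occurs more than once in
-- the phrases list is contained in some line of the text: there A appends the same
-- window once per duplicate occurrence of the key — an accidental artefact of
-- iterating a repeating key list over a single dict entry — while B records it once.
def Pre_get_context_batch (text : String) (phrases : List String) (window_size : Int) : Prop :=
  ∀ p ∈ phrases, 1 < phrases.count p →
    ∀ line ∈ PySem.Str.splitlines text, ¬(PySem.Str.isIn p line = true)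
instance (text : String) (phrases : List String) (window_size : Int) : Decidable (Pre_get_context_batch text phrases window_size) := by unfold Pre_get_context_batch; infer_instance

def pvWitness_get_context_batch : String × List String × Int := ("ab\ncd\nab", ["ab", "cd"], 1)

def Spec_get_context_batch (text : String) (phrases : List String) (window_size : Int) (out : List (String × List String)) : Prop := out = get_context_batch_alt text phrases window_size
instance (text : String) (phrases : List String) (window_size : Int) (out : List (String × List String)) : Decidable (Spec_get_context_batch text phrases window_size out) := by unfold Spec_get_context_batch; infer_instance

-- ===== CLAIM (what is proved, stated in full; the proofs are below) =====
def Claim_equal_get_context_batch : Prop := ∀ (text : String) (phrases : List String) (window_size : Int), Dom_get_context_batch text phrases window_size → Pre_get_context_batch text phrases window_size → Spec_get_context_batch text phrases window_size (get_context_batch text phrases window_size)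

-- ===== LEMMAS AND PROOFS =====

theorem pv_clampIdx_min (n : Nat) (b : Int) :
    PySem.List.clampIdx n (min (n : Int) b) = PySem.List.clampIdx n b := by
  unfold PySem.List.clampIdx
  split_ifs <;> omega

theorem pv_slice_min {α : Type} (xs : List α) (a b : Int) :
    PySem.List.slice xs (some a) (some (min (PySem.List.len xs) b)) =
      PySem.List.slice xs (some a) (some b) := by
  simp [PySem.List.slice, PySem.List.len, pv_clampIdx_min]

theorem pv_inner (line w : String) (ps : List String)
    (d : PySem.Dict String (List String)) (p : String) :
    (ps.foldl (fun d q => if PySem.Str.isIn q line then d.modify q [] (· ++ [w]) else d) d).getD p []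
      = d.getD p [] ++ (if PySem.Str.isIn p line then List.replicate (ps.count p) w else []) := by
  induction ps generalizing d with
  | nil => simp
  | cons q ps ih =>
    rw [List.foldl_cons, ih]
    by_cases hpq : p = q
    · subst hpq
      by_cases hin : PySem.Str.isIn p line
      · rw [if_pos hin, if_pos hin, if_pos hin, PySem.Dict.getD_modify_self,
          List.count_cons_self, List.append_assoc, List.replicate_succ]
        rfl
      · rw [if_neg hin, if_neg hin, if_neg hin]
    · have h1 : ((if PySem.Str.isIn q line then d.modify q [] (· ++ [w]) else d)).getD p []
          = d.getD p [] := by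
        split_ifs with h
        · exact PySem.Dict.getD_modify_of_ne d [] _ hpq
        · rfl
      rw [h1, List.count_cons_of_ne (by simp [Ne.symm hpq])]

theorem pv_outer (w : Int → String) (phrases : List String) (E : List (Int × String))
    (d : PySem.Dict String (List String)) (p : String) :
    (E.foldl (fun d il =>
        phrases.foldl (fun d q => if PySem.Str.isIn q il.2 then d.modify q [] (· ++ [w il.1]) else d) d) d).getD p []
      = d.getD p [] ++ (E.filter (fun il => PySem.Str.isIn p il.2)).flatMap
          (fun il => List.replicate (phrases.count p) (w il.1)) := by
  induction E generalizing d with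
  | nil => simp
  | cons il E ih =>
    rw [List.foldl_cons, ih, pv_inner]
    by_cases hin : PySem.Chars.isIn p.toList il.2.toList
    · simp [hin, List.append_assoc]
    · simp [hin]

theorem pv_update_subset (s xs : List String) (h : ∀ x ∈ xs, x ∈ s) :
    PySem.Set.update s xs = s := by
  rw [PySem.Set.update_eq_append_filter]
  have hnil : List.filter (fun y => !PySem.Set.contains s y) (PySem.Set.ofList xs) = [] := by
    rw [List.filter_eq_nil_iff]
    intro a ha
    have has : a ∈ s := h a ((PySem.Set.mem_ofList xs a).mp ha)
    simpa using has
  rw [hnil, List.append_nil]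

theorem pv_keys_inner (line : String) (w : String) (ps : List String)
    (d : PySem.Dict String (List String)) (h : ∀ q ∈ ps, q ∈ d.keys) :
    (ps.foldl (fun d q => if PySem.Str.isIn q line then d.modify q [] (· ++ [w]) else d) d).keys
      = d.keys := by
  rw [PySem.List.foldl_if_eq_foldl_filter (fun q => PySem.Str.isIn q line)
      (fun d q => d.modify q [] (· ++ [w])) ps d]
  rw [PySem.Dict.keys_foldl_modify _ _ (fun _ _ v => v ++ [w])]
  exact pv_update_subset _ _ (fun x hx => h x (List.mem_of_mem_filter hx))

theorem pv_keys_outer (w : Int → String) (phrases : List String) (E : List (Int × String))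
    (d : PySem.Dict String (List String)) (h : ∀ q ∈ phrases, q ∈ d.keys) :
    (E.foldl (fun d il =>
        phrases.foldl (fun d q => if PySem.Str.isIn q il.2 then d.modify q [] (· ++ [w il.1]) else d) d) d).keys
      = d.keys := by
  induction E generalizing d with
  | nil => rfl
  | cons il E ih =>
    rw [List.foldl_cons, ih, pv_keys_inner _ _ _ _ h]
    intro q hq
    rw [pv_keys_inner _ _ _ _ h]
    exact h q hq

theorem pv_init_getD (phrases : List String) (d : PySem.Dict String (List String)) (p : String)
    (h : d.getD p [] = []) :
    (phrases.foldl (fun d q => d.insert q []) d).getD p [] = [] := by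
  induction phrases generalizing d with
  | nil => exact h
  | cons q ps ih =>
    rw [List.foldl_cons]
    apply ih
    by_cases hpq : p = q
    · subst hpq; exact PySem.Dict.getD_insert_self d p [] []
    · rw [PySem.Dict.getD_insert_of_ne d [] [] hpq]; exact h

theorem pv_getD_insertfold (v : String → List String) (ps : List String)
    (d : PySem.Dict String (List String)) (p : String) :
    (ps.foldl (fun d q => d.insert q (v q)) d).getD p [] = if p ∈ ps then v p else d.getD p [] := by
  induction ps generalizing d with
  | nil => simp
  | cons q ps ih =>
    rw [List.foldl_cons, ih]
    by_cases hp : p ∈ ps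
    · rw [if_pos hp, if_pos (List.mem_cons_of_mem _ hp)]
    · rw [if_neg hp]
      by_cases hpq : p = q
      · subst hpq
        rw [PySem.Dict.getD_insert_self, if_pos List.mem_cons_self]
      · rw [PySem.Dict.getD_insert_of_ne d (v q) [] hpq, if_neg (by simp [hpq, hp])]

theorem pv_zip (xs : List String) (f : Int → String) :
    xs.zip ((PySem.List.pyRange 0 (PySem.List.len xs)).map f)
      = (PySem.List.pyRange 0 (PySem.List.len xs)).map (fun j => (PySem.List.pyGetD xs j "", f j)) := by
  have h := List.zip_map' (f := fun j => PySem.List.pyGetD xs j "") (g := f)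
    (l := PySem.List.pyRange 0 (PySem.List.len xs))
  rwa [PySem.List.map_pyGetD_pyRange_zero xs ""] at h

theorem pv_main (text : String) (phrases : List String) (window_size : Int)
    (hpre : ∀ p ∈ phrases, 1 < phrases.count p →
      ∀ line ∈ PySem.Str.splitlines text, ¬(PySem.Str.isIn p line = true)) :
    get_context_batch text phrases window_size = get_context_batch_alt text phrases window_size := by
  unfold get_context_batch get_context_batch_alt
  set lines := PySem.Str.splitlines text with hlines
  set w : Int → String := fun i => PySem.Str.join "\n"
    (PySem.List.slice lines (some (max 0 (i - window_size)))
      (some (min (PySem.List.len lines) (i + window_size + 1)))) with hw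
  set wB : Int → String := fun i => PySem.Str.join "\n"
    (PySem.List.slice lines (some (max 0 (i - window_size))) (some (i + window_size + 1))) with hwB
  set init : PySem.Dict String (List String) :=
    phrases.foldl (fun d phrase => d.insert phrase []) PySem.Dict.empty with hinit
  show ((PySem.List.enumerate lines).foldl (fun d il =>
      phrases.foldl (fun d phrase =>
        if PySem.Str.isIn phrase il.2 then d.modify phrase [] (· ++ [w il.1]) else d) d) init).items
    = (phrases.foldl (fun d p =>
        d.insert p (((lines.zip ((PySem.List.pyRange 0 (PySem.List.len lines)).map wB)).filter
          (fun lw => PySem.Str.isIn p lw.1)).map (·.2))) PySem.Dict.empty).items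
  have hmem : ∀ q ∈ phrases, q ∈ init.keys := by
    rw [hinit, PySem.Dict.keys_foldl_insert phrases (fun _ _ => []) PySem.Dict.empty,
      PySem.Dict.keys_empty, PySem.Set.update_nil_left]
    exact fun q h => (PySem.Set.mem_ofList phrases q).mpr h
  have hkeys : ((PySem.List.enumerate lines).foldl (fun d il =>
      phrases.foldl (fun d phrase =>
        if PySem.Str.isIn phrase il.2 then d.modify phrase [] (· ++ [w il.1]) else d) d) init).keys
      = PySem.Set.ofList phrases := by
    rw [pv_keys_outer w phrases _ init hmem, hinit,
      PySem.Dict.keys_foldl_insert phrases (fun _ _ => []) PySem.Dict.empty,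
      PySem.Dict.keys_empty, PySem.Set.update_nil_left]
  have hkeysB : ((phrases.foldl (fun d p =>
        d.insert p (((lines.zip ((PySem.List.pyRange 0 (PySem.List.len lines)).map wB)).filter
          (fun lw => PySem.Str.isIn p lw.1)).map (·.2))) PySem.Dict.empty) :
      PySem.Dict String (List String)).keys = PySem.Set.ofList phrases := by
    rw [PySem.Dict.keys_foldl_insert phrases _ PySem.Dict.empty,
      PySem.Dict.keys_empty, PySem.Set.update_nil_left]
  rw [PySem.Dict.items_eq_map_keys _ (by rw [hkeys]; exact PySem.Set.nodup_ofList phrases) [],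
    hkeys]
  rw [PySem.Dict.items_eq_map_keys _ (by rw [hkeysB]; exact PySem.Set.nodup_ofList phrases) [],
    hkeysB]
  apply List.map_congr_left
  intro p hpS
  have hp : p ∈ phrases := (PySem.Set.mem_ofList phrases p).mp hpS
  rw [pv_outer w phrases _ init p, pv_init_getD phrases _ p (PySem.Dict.getD_empty p []),
    List.nil_append,
    pv_getD_insertfold (fun p =>
      ((lines.zip ((PySem.List.pyRange 0 (PySem.List.len lines)).map wB)).filter
        (fun lw => PySem.Str.isIn p lw.1)).map (·.2)) phrases PySem.Dict.empty p,
    if_pos hp]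
  apply congrArg
  by_cases hc : ∀ line ∈ lines, ¬(PySem.Str.isIn p line = true)
  · -- p matches no line: both sides are empty
    have hE : (PySem.List.enumerate lines).filter (fun il => PySem.Str.isIn p il.2) = [] := by
      rw [List.filter_eq_nil_iff]
      intro il hil
      obtain ⟨k, hk, rfl⟩ := (PySem.List.mem_enumerate_iff _ _ _).mp hil
      simpa using hc _ (List.getElem_mem hk)
    have hZ : (lines.zip ((PySem.List.pyRange 0 (PySem.List.len lines)).map wB)).filter
        (fun lw => PySem.Str.isIn p lw.1) = [] := by
      rw [List.filter_eq_nil_iff]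
      intro lw hlw
      simpa using hc _ (List.of_mem_zip hlw).1
    rw [hE, hZ]
    simp
  · -- p occurs exactly once in phrases
    have hcount : phrases.count p = 1 := by
      have h1 : 0 < phrases.count p := List.count_pos_iff.mpr hp
      by_contra hne
      exact hc (hpre p hp (by omega))
    rw [hcount]
    rw [pv_zip lines wB, List.filter_map]
    rw [PySem.List.enumerate_eq_map_pyRange lines "", List.filter_map]
    simp only [List.replicate_one]
    have hflat : ∀ (L : List (Int × String)),
        L.flatMap (fun il => [w il.1]) = L.map (fun il => w il.1) := fun L => by
      induction L with
      | nil => rfl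
      | cons a t ih => simp only [List.flatMap_cons, List.map_cons, ih, List.singleton_append]
    rw [hflat]
    simp only [List.map_map, Function.comp_def]
    apply List.map_congr_left
    intro j _
    show w j = wB j
    simp only [hw, hwB]
    rw [pv_slice_min]

-- ===== VERDICT (by name: the statement is the Claim_ definition above) =====
theorem get_context_batch_spec : Claim_equal_get_context_batch := by
  intro text phrases window_size _ hpre
  unfold Spec_get_context_batch
  exact pv_main text phrases window_size hpre
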